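-- pv_equiv track=rewrite | github.com/Sharma-Pragya/AutoTA | autota/verify/boolean.py | _convert_prefix_not
-- ===== SOURCE A (Python) =====
-- def _convert_prefix_not(expr: str) -> str:
--     """Convert prefix NOT (~) to postfix NOT (').
--
--     Args:
--         expr: Expression that may contain ~
--
--     Returns:
--         Expression with only postfix NOT
--     """
--     result = []
--     i = 0
--     while i < len(expr):
--         if expr[i] == "~":
--             # Find what comes after ~
--             i += 1
--             if i < len(expr):
--                 if expr[i] == "(":
--                     # Find matching closing paren
--                     paren_count = 1
--                     j = i + 1
--                     while j < len(expr) and paren_count > 0: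
--                         if expr[j] == "(":
--                             paren_count += 1
--                         elif expr[j] == ")":
--                             paren_count -= 1
--                         j += 1
--                     # Add the parenthesized expression with ' after
--                     result.append(expr[i:j] + "'")
--                     i = j
--                 elif expr[i].isalnum():
--                     # Single variable
--                     result.append(expr[i] + "'")
--                     i += 1
--                 else:
--                     raise ValueError(f"Invalid character after ~ at position {i}")
--         else:
--             result.append(expr[i])
--             i += 1
--
--     return "".join(result)
-- ===== SOURCE B (Python) =====
-- def _convert_prefix_not(expr: str) -> str:
--     """Convert prefix NOT (~) to postfix NOT (') in a single pass.
--
--     A '~' before a variable appends "'" right after it; a '~' before '(' marks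
--     the group: we track the paren depth and emit "'" when the group's matching
--     ')' (or the end of the string) is reached, copying the group verbatim.
--     """
--     out = []
--     depth = 0
--     neg = None      # depth of the active negated group, if any
--     tilde = False   # previous char was a top-level '~' awaiting its operand
--     for idx, ch in enumerate(expr):
--         if tilde:
--             tilde = False
--             if ch == '(':
--                 depth += 1
--                 neg = depth
--                 out.append(ch)
--             elif ch.isalnum():
--                 out.append(ch)
--                 out.append("'")
--             else:
--                 raise ValueError(f"Invalid character after ~ at position {idx}")
--         elif neg is None and ch == '~':
--             tilde = True
--         else:
--             out.append(ch)
--             if ch == '(':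
--                 depth += 1
--             elif ch == ')':
--                 if neg == depth:
--                     out.append("'")
--                     neg = None
--                 depth -= 1
--     if neg is not None:
--         out.append("'")
--     return "".join(out)
-- ===== Notes on version B (the rewrite author's own statement) =====
-- stated objective: alternative
-- what changed: A rescans each negated parenthesized group with an inner paren-counting loop and index jumps; B is a single pass that tracks the current paren depth and the depth of the one possible active negated group, emitting the postfix quote when that depth closes, so the inner scan disappears.
-- outside the precondition, e.g. on _convert_prefix_not('~(~+)'): A returns "(~+)'", B returns "(~+)'"
import Mathlib
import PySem

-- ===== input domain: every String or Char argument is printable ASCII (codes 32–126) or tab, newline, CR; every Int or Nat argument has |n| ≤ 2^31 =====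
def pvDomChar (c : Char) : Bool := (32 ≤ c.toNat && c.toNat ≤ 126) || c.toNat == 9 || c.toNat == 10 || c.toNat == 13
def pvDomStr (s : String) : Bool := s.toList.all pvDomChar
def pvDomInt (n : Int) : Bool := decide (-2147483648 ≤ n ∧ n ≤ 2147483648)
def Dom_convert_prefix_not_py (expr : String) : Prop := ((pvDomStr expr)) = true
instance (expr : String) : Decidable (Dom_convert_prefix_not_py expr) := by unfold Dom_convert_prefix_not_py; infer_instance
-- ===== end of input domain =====

-- B replaces A's inner paren-counting rescan of each negated parenthesized group by a single pass that
-- tracks the paren depth and the depth of the active negated group (objective: alternative).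

-- ===== PORT A =====
-- A's inner while loop: scan until paren_count hits 0 or the string ends;
-- returns (chars consumed, remainder)
def scanA : List Char → Nat → List Char × List Char
  | [], _ => ([], [])
  | c :: r, cnt =>
    let cnt' := if c = '(' then cnt + 1 else if c = ')' then cnt - 1 else cnt
    if cnt' = 0 then ([c], r)
    else
      let p := scanA r cnt'
      (c :: p.1, p.2)

-- the remainder is no longer than the input (cited by goA's decreasing_by)
theorem scanA_len (l : List Char) (cnt : Nat) : (scanA l cnt).2.length ≤ l.length := by
  induction l generalizing cnt with
  | nil => simp [scanA]
  | cons c r ih =>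
    simp only [scanA]
    by_cases h : (if c = '(' then cnt + 1 else if c = ')' then cnt - 1 else cnt) = 0
    · simp [h]
    · simpa [h] using Nat.le_succ_of_le (ih _)

-- A's outer while loop, step for step (the final 'else' on a bad char after '~' is
-- where Python raises ValueError; those inputs are excluded by Pre_)
def goA : List Char → List Char
  | [] => []
  | c :: rest =>
    if c = '~' then
      match rest with
      | [] => []
      | c2 :: rest2 =>
        if c2 = '(' then
          let p := scanA rest2 1
          (c2 :: p.1 ++ ['\'']) ++ goA p.2
        else if c2.isAlphanum then c2 :: '\'' :: goA rest2
        else goA rest2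
    else c :: goA rest
  termination_by l => l.length
  decreasing_by
    · exact Nat.lt_succ_of_lt (Nat.lt_succ_of_le (scanA_len _ _))
    · simp
    · simp
    · simp

def convert_prefix_not_py (expr : String) : String := String.ofList (goA expr.toList)

-- ===== PORT B =====
-- Source B's single pass: d = current paren depth, neg = depth of the active negated
-- group (if any), last Bool = tilde flag (previous char was a pending top-level '~');
-- at the end of the string a still-open negated group gets its quote; the bad-char
-- case is Python's raise, excluded by Pre_
def goB : List Char → Int → Option Int → Bool → List Char
  | [], _, neg, _ => if neg.isSome then ['\''] else []
  | c :: rest, d, neg, tilde =>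
    if tilde then
      if c = '(' then c :: goB rest (d + 1) (some (d + 1)) false
      else if c.isAlphanum then c :: '\'' :: goB rest d neg false
      else goB rest d neg false
    else if neg = none ∧ c = '~' then goB rest d neg true
    else
      c :: (if c = '(' then goB rest (d + 1) neg false
            else if c = ')' then
              (if neg = some d then '\'' :: goB rest (d - 1) none false
               else goB rest (d - 1) neg false)
            else goB rest d neg false)

def convert_prefix_not_py_alt (expr : String) : String :=
  String.ofList (goB expr.toList 0 none false)

-- ===== PRECONDITION & SPEC =====
-- Pre_ requires every '~' to be the last character or immediately followed by an
-- alphanumeric character or '('; on a '~' violating this at top level both programs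
-- raise ValueError. Pre_ also excludes inputs whose only bad '~' sits inside an
-- already-negated group (there A returns, copying it verbatim, and B agrees): the
-- simple adjacent-pair condition is stated at all positions rather than re-simulating
-- which '~'s the scan actually inspects.
def preB : List Char → Bool
  | c :: c2 :: r => (!(c = '~') || (c2 = '(' || c2.isAlphanum)) && preB (c2 :: r)
  | _ => true

def Pre_convert_prefix_not_py (expr : String) : Prop := preB expr.toList = true
instance (expr : String) : Decidable (Pre_convert_prefix_not_py expr) := by
  unfold Pre_convert_prefix_not_py; infer_instance

def pvWitness_convert_prefix_not_py : String := "a+~(b*~c)+~d"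

def Spec_convert_prefix_not_py (expr : String) (out : String) : Prop := out = convert_prefix_not_py_alt expr
instance (expr : String) (out : String) : Decidable (Spec_convert_prefix_not_py expr out) := by unfold Spec_convert_prefix_not_py; infer_instance

-- ===== CLAIM (what is proved, stated in full; the proofs are below) =====
def Claim_equal_convert_prefix_not_py : Prop := ∀ (expr : String), Dom_convert_prefix_not_py expr → Pre_convert_prefix_not_py expr → Spec_convert_prefix_not_py expr (convert_prefix_not_py expr)

-- ===== LEMMAS AND PROOFS =====

theorem scanA_append (l : List Char) (cnt : Nat) :
    (scanA l cnt).1 ++ (scanA l cnt).2 = l := by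
  induction l generalizing cnt with
  | nil => simp [scanA]
  | cons c r ih =>
    simp only [scanA]
    by_cases h : (if c = '(' then cnt + 1 else if c = ')' then cnt - 1 else cnt) = 0
    · simp [h]
    · simpa [h] using ih _

-- B's verbatim mode reproduces A's inner group scan: with cnt pending opens
-- (current depth e + cnt - 1 for a negated group entered at depth e), B copies
-- exactly what scanA consumes, emits the quote, and resumes normal mode
theorem groupLemma (l : List Char) (e : Int) (cnt : Nat) (hcnt : 1 ≤ cnt) :
    goB l (e + cnt - 1) (some e) false
      = (scanA l cnt).1 ++ '\'' :: goB (scanA l cnt).2 (e - 1) none false := by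
  induction l generalizing e cnt with
  | nil => simp [goB, scanA]
  | cons c r ih =>
    by_cases hco : c = '('
    · subst hco
      have hih := ih e (cnt + 1) (by omega)
      push_cast at hih
      simp only [goB, scanA]
      simp
      rw [show e + (cnt : Int) = e + ((cnt : Int) + 1) - 1 from by ring, hih]
    · by_cases hcc : c = ')'
      · subst hcc
        by_cases h1 : cnt = 1
        · subst h1
          simp only [goB, scanA]
          simp [hco]
        · have hih := ih e (cnt - 1) (by omega)
          push_cast [Nat.cast_sub hcnt] at hih
          have hne : ¬ (some e = some (e + cnt - 1)) := by
            simp only [Option.some.injEq]; intro h; omega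
          simp only [goB, scanA]
          simp [hco, hne, show ¬ cnt - 1 = 0 by omega]
          rw [show e + (cnt : Int) - 1 - 1 = e + ((cnt : Int) - 1) - 1 from by ring, hih]
      · have hih := ih e cnt hcnt
        simp only [goB, scanA]
        simp [hco, hcc, hih, show ¬ cnt = 0 by omega]

theorem preB_tail (c : Char) (t : List Char) (h : preB (c :: t) = true) : preB t = true := by
  cases t with
  | nil => rfl
  | cons c2 r => simp only [preB, Bool.and_eq_true] at h; exact h.2

theorem preB_suffix (a b : List Char) (h : preB (a ++ b) = true) : preB b = true := by
  induction a with
  | nil => exact h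
  | cons x a' ih => exact ih (preB_tail x _ h)

theorem mainLemma (n : Nat) : ∀ (l : List Char) (d : Int), l.length ≤ n → preB l = true →
    goA l = goB l d none false := by
  induction n with
  | zero =>
    intro l d hl _
    have hnil : l = [] := List.eq_nil_of_length_eq_zero (Nat.le_zero.mp hl)
    subst hnil; simp [goA, goB]
  | succ m ih =>
    intro l d hl hp
    cases l with
    | nil => simp [goA, goB]
    | cons c rest =>
      by_cases hc : c = '~'
      · subst hc
        cases rest with
        | nil => simp [goA, goB]
        | cons c2 r2 =>
          have hgood : c2 = '(' ∨ c2.isAlphanum = true := by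
            have h1 := hp
            simp [preB] at h1
            tauto
          have hp2 : preB (c2 :: r2) = true := preB_tail _ _ hp
          have hpr2 : preB r2 = true := preB_tail _ _ hp2
          by_cases hpar : c2 = '('
          · subst hpar
            have hg := groupLemma r2 (d + 1) 1 (le_refl 1)
            norm_num at hg
            have hsuf : preB (scanA r2 1).2 = true := by
              have hap := scanA_append r2 1
              exact preB_suffix _ _ (hap ▸ hpr2)
            have hlen : (scanA r2 1).2.length ≤ m := by
              have h1 := scanA_len r2 1
              simp only [List.length_cons] at hl
              omega
            have hmain := ih _ d hlen hsuf
            simp only [goA, goB]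
            simp [hg, hmain]
          · have halnum : c2.isAlphanum = true := by
              rcases hgood with h | h
              · exact absurd h hpar
              · exact h
            have hlen : r2.length ≤ m := by simp only [List.length_cons] at hl; omega
            have hmain := ih _ d hlen hpr2
            simp only [goA, goB]
            simp [hpar, halnum, hmain]
      · have hpt : preB rest = true := preB_tail _ _ hp
        have hlen : rest.length ≤ m := by simp only [List.length_cons] at hl; omega
        by_cases h1 : c = '('
        · rw [goA.eq_def]; simp [goB, h1, ih _ (d + 1) hlen hpt]
        · by_cases h2 : c = ')'
          · rw [goA.eq_def]; simp [goB, h2, ih _ (d - 1) hlen hpt]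
          · rw [goA.eq_def]; simp [goB, hc, h1, h2, ih _ d hlen hpt]

-- ===== VERDICT (by name: the statement is the Claim_ definition above) =====
theorem convert_prefix_not_py_spec : Claim_equal_convert_prefix_not_py := by
  intro expr _ hpre
  unfold Spec_convert_prefix_not_py convert_prefix_not_py convert_prefix_not_py_alt
  rw [mainLemma expr.toList.length expr.toList 0 (le_refl _) hpre]
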